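-- pv_equiv track=rewrite | github.com/ethe/salon | salon_tbench/broker.py | _append_output
-- ===== SOURCE A (Python) =====
-- def _append_output(existing: str, chunk: str) -> str:
-- 	if not chunk:
-- 		return existing
-- 	max_overlap = min(len(existing), len(chunk))
-- 	for overlap in range(max_overlap, 0, -1):
-- 		if existing.endswith(chunk[:overlap]):
-- 			return existing + chunk[overlap:]
-- 	return existing + chunk
-- ===== SOURCE B (Python) =====
-- def _append_output(existing: str, chunk: str) -> str:
--     if not chunk:
--         return existing
--     m = min(len(existing), len(chunk))
--     tail = existing[len(existing) - m:]
--     # KMP prefix function of chunk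
--     pi = [0]
--     k = 0
--     for i in range(1, len(chunk)):
--         ch = chunk[i]
--         while k and chunk[k] != ch:
--             k = pi[k - 1]
--         if chunk[k] == ch:
--             k += 1
--         pi.append(k)
--     # run the KMP automaton over the last m characters of existing;
--     # final state = longest prefix of chunk that is a suffix of existing (capped at m)
--     k = 0
--     for ch in tail:
--         while k and chunk[k] != ch:
--             k = pi[k - 1]
--         if chunk[k] == ch:
--             k += 1
--     return existing + chunk[k:]
-- ===== Notes on version B (the rewrite author's own statement) =====
-- stated objective: faster
-- what changed: A brute-forces every overlap length from longest to shortest with a fresh slice and an endswith test each time; B computes the KMP prefix function of chunk and runs the KMP automaton over the last min-length characters of existing, whose final state is exactly the longest prefix of chunk that is a suffix of existing.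
import Mathlib
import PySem

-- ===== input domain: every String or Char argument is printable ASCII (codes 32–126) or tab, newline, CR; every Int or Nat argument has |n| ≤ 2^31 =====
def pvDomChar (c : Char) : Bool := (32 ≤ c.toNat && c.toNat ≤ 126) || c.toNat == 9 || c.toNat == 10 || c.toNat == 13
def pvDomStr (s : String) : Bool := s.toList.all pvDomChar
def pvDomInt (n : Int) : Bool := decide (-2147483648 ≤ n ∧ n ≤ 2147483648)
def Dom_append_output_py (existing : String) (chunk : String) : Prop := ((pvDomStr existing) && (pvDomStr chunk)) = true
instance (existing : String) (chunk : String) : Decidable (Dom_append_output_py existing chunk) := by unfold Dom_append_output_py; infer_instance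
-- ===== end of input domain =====

-- B replaces A's descending brute-force scan over all overlap lengths by the KMP prefix
-- function of chunk plus one automaton pass over the last min-length characters of existing
-- (objective: faster, O(m + |chunk|) instead of O(m^2)).

-- ===== PORT A =====
-- the 'for overlap in range(max_overlap, 0, -1)' loop with its early return
def appendA_go (existing chunk : List Char) : List Int → List Char
  | [] => existing ++ chunk
  | ov :: rest =>
    if PySem.Chars.endswith existing (PySem.List.slice chunk none (some ov)) then
      existing ++ PySem.List.slice chunk (some ov) none
    else appendA_go existing chunk rest

def append_output_py (existing : String) (chunk : String) : String :=
  if chunk = "" then existing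
  else
    let e := existing.toList
    let c := chunk.toList
    let max_overlap : Int := min (e.length : Int) (c.length : Int)
    String.ofList (appendA_go e c (PySem.List.pyRange max_overlap 0 (-1)))

-- ===== PORT B =====
-- the inner 'while k and chunk[k] != ch: k = pi[k-1]' loop of Source B; indices are in range on
-- every call B makes (k ≤ processed position < len chunk), so getD is Python's chunk[k]/pi[k-1];
-- fuel = k is enough because every stored pi value satisfies pi[j] ≤ j, so k strictly decreases
def kmpFall (c : List Char) (pi : List Nat) (ch : Char) : Nat → Nat → Nat
  | k, 0 => k
  | k, fuel+1 =>
    if k ≠ 0 ∧ c.getD k default ≠ ch then kmpFall c pi ch (pi.getD (k-1) 0) fuel else k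

-- one step of either of Source B's two outer loops (fall, then 'if chunk[k] == ch: k += 1')
def kmpStep (c : List Char) (pi : List Nat) (k : Nat) (ch : Char) : Nat :=
  let k1 := kmpFall c pi ch k k
  if c.getD k1 default = ch then k1 + 1 else k1

-- the 'for i in range(1, len(chunk))' loop building pi (pi.append(k) each round)
def buildPiGo (c : List Char) (pi : List Nat) (k : Nat) (i : Nat) : List Nat × Nat :=
  if _h : i < c.length then
    let k2 := kmpStep c pi k (c.getD i default)
    buildPiGo c (pi ++ [k2]) k2 (i+1)
  else (pi, k)
termination_by c.length - i

def append_output_py_alt (existing : String) (chunk : String) : String :=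
  if chunk = "" then existing
  else
    let e := existing.toList
    let c := chunk.toList
    let m := min e.length c.length
    let tail := PySem.List.slice e (some ((e.length : Int) - (m : Int))) none
    let pi := (buildPiGo c [0] 0 1).1
    let k := tail.foldl (kmpStep c pi) 0
    String.ofList (e ++ PySem.List.slice c (some ((k : Nat) : Int)) none)

-- ===== PRECONDITION & SPEC =====
def Spec_append_output_py (existing : String) (chunk : String) (out : String) : Prop := out = append_output_py_alt existing chunk
instance (existing : String) (chunk : String) (out : String) : Decidable (Spec_append_output_py existing chunk out) := by unfold Spec_append_output_py; infer_instance

-- ===== CLAIM (what is proved, stated in full; the proofs are below) =====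
def Claim_equal_append_output_py : Prop := ∀ (existing : String) (chunk : String), Dom_append_output_py existing chunk → Spec_append_output_py existing chunk (append_output_py existing chunk)

-- ===== LEMMAS AND PROOFS =====

-- longest proper border of c.take j: largest b < j with c.take b a suffix of c.take j
def pvPb (c : List Char) (j : Nat) : Nat :=
  Nat.findGreatest (fun b => c.take b <:+ c.take j) (j - 1)

-- of two suffixes of the same list, the shorter is a suffix of the longer
theorem pv_suffix_of_suffix_le {α : Type} (u v t : List α) (hu : u <:+ t) (hv : v <:+ t)
    (hl : u.length ≤ v.length) : u <:+ v := by
  rw [← List.reverse_prefix] at hu hv ⊢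
  exact List.prefix_of_prefix_length_le hu hv (by simpa using hl)

theorem pv_border_trans (c t : List Char) (b k : Nat) (hbk : b ≤ k)
    (hk : c.take k <:+ t) (hb : c.take b <:+ t) : c.take b <:+ c.take k :=
  pv_suffix_of_suffix_le _ _ _ hb hk (by simp; omega)

theorem pvPb_le (c : List Char) (j : Nat) : pvPb c j ≤ j - 1 :=
  Nat.findGreatest_le _

theorem pvPb_border (c : List Char) (j : Nat) : c.take (pvPb c j) <:+ c.take j :=
  Nat.findGreatest_spec (P := fun b => c.take b <:+ c.take j) (Nat.zero_le _)
    (by simp)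

theorem pvPb_max (c : List Char) (j b : Nat) (hb : b < j) (h : c.take b <:+ c.take j) :
    b ≤ pvPb c j :=
  Nat.le_findGreatest (by omega) h

-- the fall loop stops at the largest border b ≤ k of t whose next chunk character is ch (or 0)
theorem pv_fallSpec (c : List Char) (pi : List Nat) (ch : Char) (t : List Char) (kmax : Nat)
    (Hpi : ∀ j, 1 ≤ j → j ≤ kmax → pi.getD (j-1) 0 = pvPb c j) :
    ∀ fuel k, k ≤ fuel → k ≤ kmax → c.take k <:+ t →
      kmpFall c pi ch k fuel ≤ k ∧
      c.take (kmpFall c pi ch k fuel) <:+ t ∧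
      (kmpFall c pi ch k fuel = 0 ∨ c.getD (kmpFall c pi ch k fuel) default = ch) ∧
      (∀ b, b ≤ k → c.take b <:+ t → c.getD b default = ch → b ≤ kmpFall c pi ch k fuel) := by
  intro fuel
  induction fuel with
  | zero =>
    intro k hf _ hsuf
    have hk0 : k = 0 := by omega
    subst hk0
    refine ⟨le_rfl, by simp [kmpFall], Or.inl rfl, ?_⟩
    intro b hb _ _; omega
  | succ fuel ih =>
    intro k hf hkmax hsuf
    rw [kmpFall]
    by_cases hcond : k ≠ 0 ∧ c.getD k default ≠ ch
    · rw [if_pos hcond]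
      obtain ⟨hk0, hchar⟩ := hcond
      have hpik : pi.getD (k-1) 0 = pvPb c k := Hpi k (by omega) hkmax
      rw [hpik]
      have hpb_lt : pvPb c k < k := by have := pvPb_le c k; omega
      have hpb_suf : c.take (pvPb c k) <:+ t := (pvPb_border c k).trans hsuf
      have ih' := ih (pvPb c k) (by omega) (by omega) hpb_suf
      refine ⟨by omega, ih'.2.1, ih'.2.2.1, ?_⟩
      intro b hb hbsuf hbch
      have hbk : b ≠ k := by intro h; subst h; exact hchar hbch
      have hblt : b < k := by omega
      have hbb : c.take b <:+ c.take k := pv_border_trans c t b k (by omega) hsuf hbsuf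
      exact ih'.2.2.2 b (pvPb_max c k b hblt hbb) hbsuf hbch
    · rw [if_neg hcond]
      push Not at hcond
      refine ⟨le_rfl, hsuf, ?_, fun b hb _ _ => hb⟩
      by_cases hk0 : k = 0
      · exact Or.inl hk0
      · exact Or.inr (hcond hk0)

-- one automaton step turns 'largest overlap ≤ K with t' into 'largest overlap ≤ K+1 with t ++ [ch]'
theorem pv_stepSpec (c : List Char) (pi : List Nat) (ch : Char) (t : List Char) (K k : Nat)
    (HK : K + 1 ≤ c.length) (hk : k ≤ K)
    (Hpi : ∀ j, 1 ≤ j → j ≤ k → pi.getD (j-1) 0 = pvPb c j)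
    (hsuf : c.take k <:+ t)
    (hmax : ∀ b, b ≤ K → c.take b <:+ t → b ≤ k) :
    kmpStep c pi k ch ≤ K + 1 ∧
    c.take (kmpStep c pi k ch) <:+ t ++ [ch] ∧
    (∀ b, b ≤ K + 1 → c.take b <:+ t ++ [ch] → b ≤ kmpStep c pi k ch) := by
  obtain ⟨hr_le, hr_suf, hr_stop, hr_max⟩ :=
    pv_fallSpec c pi ch t k Hpi k k le_rfl le_rfl hsuf
  set r := kmpFall c pi ch k k with hrdef
  unfold kmpStep
  rw [← hrdef]
  have hrlen : r < c.length := by omega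
  have hsnoc : ∀ b : Nat, b < c.length →
      (c.take (b+1) <:+ t ++ [ch] ↔ (c.take b <:+ t ∧ c.getD b default = ch)) := by
    intro b hblen
    have htake : c.take (b+1) = c.take b ++ [c.getD b default] := by
      rw [List.take_succ]
      congr 1
      rw [List.getElem?_eq_getElem hblen]
      simp [List.getD, List.getElem?_eq_getElem hblen]
    rw [htake]
    constructor
    · rintro ⟨s, hs⟩
      rw [← List.append_assoc] at hs
      obtain ⟨h1, h2⟩ := List.append_inj' hs rfl
      have hch : c.getD b default = ch := by simpa using h2
      exact ⟨⟨s, h1⟩, hch⟩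
    · rintro ⟨⟨s, hs⟩, hch⟩
      exact ⟨s, by rw [hch, ← List.append_assoc, hs]⟩
  by_cases hrc : c.getD r default = ch
  · rw [if_pos hrc]
    refine ⟨by omega, ?_, ?_⟩
    · exact (hsnoc r hrlen).mpr ⟨hr_suf, hrc⟩
    · intro b hb hbsuf
      match b with
      | 0 => omega
      | b'+1 =>
        have hb'len : b' < c.length := by omega
        obtain ⟨hb'suf, hb'ch⟩ := (hsnoc b' hb'len).mp hbsuf
        have hb'k : b' ≤ k := hmax b' (by omega) hb'suf
        have := hr_max b' hb'k hb'suf hb'ch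
        omega
  · rw [if_neg hrc]
    have hr0 : r = 0 := by
      rcases hr_stop with h | h
      · exact h
      · exact absurd h hrc
    refine ⟨by omega, by rw [hr0]; simp, ?_⟩
    intro b hb hbsuf
    match b with
    | 0 => omega
    | b'+1 =>
      have hb'len : b' < c.length := by omega
      obtain ⟨hb'suf, hb'ch⟩ := (hsnoc b' hb'len).mp hbsuf
      have hb'k : b' ≤ k := hmax b' (by omega) hb'suf
      have hb'r : b' ≤ r := hr_max b' hb'k hb'suf hb'ch
      rw [hr0] at hb'r
      interval_cases b'
      rw [hr0] at hrc
      exact absurd hb'ch hrc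

-- the pi-building loop fills pi with the longest proper borders of every prefix of c
theorem pv_buildPiGo_spec (c : List Char) :
    ∀ fuel i pi k, c.length - i ≤ fuel → 1 ≤ i → i ≤ c.length →
    pi.length = i →
    (∀ j, 1 ≤ j → j ≤ i → pi.getD (j-1) 0 = pvPb c j) →
    k = pvPb c i →
    (buildPiGo c pi k i).1.length = c.length ∧
    (∀ j, 1 ≤ j → j ≤ c.length → (buildPiGo c pi k i).1.getD (j-1) 0 = pvPb c j) := by
  intro fuel
  induction fuel with
  | zero =>
    intro i pi k hfuel h1 h2 hlen Hpi hk
    have hieq : i = c.length := by omega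
    rw [buildPiGo, dif_neg (by omega)]
    exact ⟨by rw [hlen, hieq], fun j hj1 hj2 => Hpi j hj1 (by omega)⟩
  | succ fuel ih =>
    intro i pi k hfuel h1 h2 hlen Hpi hk
    rw [buildPiGo]
    by_cases hi : i < c.length
    · rw [dif_pos hi]
      have hstep := pv_stepSpec c pi (c.getD i default) (c.take i) (i-1) k
        (by omega) (by have := pvPb_le c i; omega)
        (fun j hj1 hj2 => Hpi j hj1 (by have := pvPb_le c i; omega))
        (hk ▸ pvPb_border c i)
        (fun b hb hbsuf => hk ▸ pvPb_max c i b (by omega) hbsuf)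
      have htsnoc : c.take i ++ [c.getD i default] = c.take (i+1) := by
        rw [List.take_succ]
        congr 1
        rw [List.getElem?_eq_getElem hi]
        simp [List.getD, List.getElem?_eq_getElem hi]
      rw [htsnoc] at hstep
      have hi1 : i - 1 + 1 = i := by omega
      rw [hi1] at hstep
      obtain ⟨hs_le, hs_suf, hs_max⟩ := hstep
      set k2 := kmpStep c pi k (c.getD i default) with hk2def
      have hk2 : k2 = pvPb c (i+1) := by
        have h1' : k2 ≤ pvPb c (i+1) := pvPb_max c (i+1) k2 (by omega) hs_suf
        have h2' : pvPb c (i+1) ≤ k2 := by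
          apply hs_max
          · have := pvPb_le c (i+1); omega
          · exact pvPb_border c (i+1)
        omega
      apply ih (i+1) (pi ++ [k2]) k2 (by omega) (by omega) (by omega)
        (by simp [hlen])
      · intro j hj1 hj2
        by_cases hji : j ≤ i
        · have hjlt : j - 1 < pi.length := by omega
          rw [show (pi ++ [k2]).getD (j-1) 0 = pi.getD (j-1) 0 from by
            simp [List.getD, List.getElem?_append_left hjlt]]
          exact Hpi j hj1 hji
        · have hj : j = i + 1 := by omega
          subst hj
          simp only [Nat.add_sub_cancel]
          rw [show (pi ++ [k2]).getD i 0 = k2 from by simp [List.getD, hlen], hk2]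
      · exact hk2
    · rw [dif_neg hi]
      have hieq : i = c.length := by omega
      exact ⟨by rw [hlen, hieq], fun j hj1 hj2 => Hpi j hj1 (by omega)⟩

-- the automaton pass: after j characters of tail the state is the largest overlap with tail.take j
theorem pv_foldSpec (c : List Char) (pi : List Nat) (tail : List Char) (hlen : tail.length ≤ c.length)
    (Hpi : ∀ j, 1 ≤ j → j ≤ c.length → pi.getD (j-1) 0 = pvPb c j) :
    ∀ j, j ≤ tail.length →
      (tail.take j).foldl (kmpStep c pi) 0 ≤ j ∧
      c.take ((tail.take j).foldl (kmpStep c pi) 0) <:+ tail.take j ∧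
      (∀ b, b ≤ j → c.take b <:+ tail.take j → b ≤ (tail.take j).foldl (kmpStep c pi) 0) := by
  intro j
  induction j with
  | zero =>
    intro _
    refine ⟨le_rfl, by simp, ?_⟩
    intro b hb _; omega
  | succ j ih =>
    intro hj
    have hjlt : j < tail.length := by omega
    obtain ⟨ihle, ihsuf, ihmax⟩ := ih (by omega)
    have htsnoc : tail.take (j+1) = tail.take j ++ [tail.getD j default] := by
      rw [List.take_succ]
      congr 1
      rw [List.getElem?_eq_getElem hjlt]
      simp [List.getD, List.getElem?_eq_getElem hjlt]
    rw [htsnoc, List.foldl_append]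
    simp only [List.foldl_cons, List.foldl_nil]
    set k := (tail.take j).foldl (kmpStep c pi) 0 with hkdef
    exact pv_stepSpec c pi (tail.getD j default) (tail.take j) j k
      (by omega) ihle
      (fun j' hj'1 hj'2 => Hpi j' hj'1 (by omega))
      ihsuf ihmax

-- A's loop returns existing ++ chunk[g:] for g the greatest overlap ≤ n
theorem pvA_loop_eq (e c : List Char) : ∀ n : Nat,
    appendA_go e c (PySem.List.pyRange (n : Int) 0 (-1)) =
      e ++ List.drop (Nat.findGreatest (fun k => c.take k <:+ e) n) c := by
  intro n
  induction n with
  | zero =>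
    rw [Nat.cast_zero, PySem.List.pyRange_neg_one_eq_nil le_rfl]
    simp [appendA_go]
  | succ n ih =>
    rw [PySem.List.pyRange_neg_one_cons (by push_cast; omega)]
    rw [appendA_go]
    have h1 : ((n + 1 : Nat) : Int) - 1 = (n : Int) := by push_cast; ring
    rw [h1, ih]
    rw [PySem.List.slice_to _ (by push_cast; omega)]
    rw [PySem.List.slice_from _ (by push_cast; omega)]
    have h2 : ((n + 1 : Nat) : Int).toNat = n + 1 := by omega
    rw [h2, Nat.findGreatest_succ]
    by_cases hq : c.take (n+1) <:+ e
    · rw [if_pos ((PySem.Chars.endswith_iff e _).mpr hq), if_pos hq]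
    · rw [if_neg (fun h => hq ((PySem.Chars.endswith_iff e _).mp h)), if_neg hq]

-- ===== VERDICT (by name: the statement is the Claim_ definition above) =====
theorem append_output_py_spec : Claim_equal_append_output_py := by
  intro existing chunk _
  unfold Spec_append_output_py
  by_cases hch : chunk = ""
  · simp [append_output_py, append_output_py_alt, hch]
  · simp only [append_output_py, append_output_py_alt, if_neg hch]
    have hc : chunk.toList ≠ [] := fun h => hch (String.toList_eq_nil_iff.mp h)
    set e := existing.toList with hedef
    set c := chunk.toList with hcdef
    set m := min e.length c.length with hmdef
    have hclen : 1 ≤ c.length := List.length_pos_iff.mpr hc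
    have hme : m ≤ e.length := Nat.min_le_left _ _
    have hmc : m ≤ c.length := Nat.min_le_right _ _
    have hmin : min ((e.length : Int)) ((c.length : Int)) = (m : Int) :=
      (Nat.cast_min e.length c.length).symm
    rw [hmin]
    have htail : PySem.List.slice e (some ((e.length : Int) - (m : Int))) none
        = List.drop (e.length - m) e := by
      have hcast : (e.length : Int) - (m : Int) = ((e.length - m : Nat) : Int) := by omega
      rw [hcast, PySem.List.slice_from_natCast]
    rw [htail]
    set tail := List.drop (e.length - m) e with htdef
    have htl : tail.length = m := by rw [htdef]; simp; omega
    set pi := (buildPiGo c [0] 0 1).1 with hpidef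
    have hpi0 : ∀ j, 1 ≤ j → j ≤ (1:Nat) → ([0] : List Nat).getD (j-1) 0 = pvPb c j := by
      intro j hj1 hj2
      have hj : j = 1 := by omega
      subst hj
      simp [pvPb]
    have hk00 : (0:Nat) = pvPb c 1 := by simp [pvPb]
    have Hpi : ∀ j, 1 ≤ j → j ≤ c.length → pi.getD (j-1) 0 = pvPb c j :=
      (pv_buildPiGo_spec c (c.length - 1) 1 [0] 0 (by omega) le_rfl hclen rfl hpi0 hk00).2
    have hfold := pv_foldSpec c pi tail (by omega) Hpi m (by omega)
    rw [show tail.take m = tail from by rw [← htl]; simp] at hfold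
    obtain ⟨hkle, hksuf, hkmax⟩ := hfold
    set kB := tail.foldl (kmpStep c pi) 0 with hkBdef
    rw [pvA_loop_eq]
    set P := fun k => c.take k <:+ e with hPdef
    have htail_suf : tail <:+ e := List.drop_suffix _ _
    set gA := Nat.findGreatest P m with hgAdef
    have hgA_le : gA ≤ m := Nat.findGreatest_le _
    have hgA_P : P gA :=
      Nat.findGreatest_spec (P := P) (Nat.zero_le _) (by simp [hPdef])
    have heq : gA = kB := by
      have h1' : kB ≤ gA := by
        apply Nat.le_findGreatest hkle
        show c.take kB <:+ e
        exact hksuf.trans htail_suf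
      have h2' : gA ≤ kB := by
        apply hkmax gA hgA_le
        exact pv_suffix_of_suffix_le _ _ _ hgA_P htail_suf (by simp [htl]; omega)
      omega
    rw [← heq]
    rw [PySem.List.slice_from_natCast]
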